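-- pv_equiv track=rewrite | github.com/atgeirr/Damaris | python/damaris4py/damaris4py/dask/damaris_dask.py | return_dask_block_layout
-- ===== SOURCE A (Python) =====
-- def return_separator(p0, p1, dim, instr, first_elem):
--     resstr = ''
--     if p1[dim] > p0[dim]:
--         if first_elem == False:
--             resstr = instr + ","
--         else:
--             first_elem = False
--             resstr = instr + ","
--     elif p1[dim] <= p0[dim]:
--         if dim > 0:
--             instr += "]\n"
--             first_elem = False
--             resstr2, first_elem = return_separator(p0, p1, dim-1, instr, first_elem)
--             first_elem = True
--             resstr += resstr2 + "["
--     return resstr, first_elem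
--
-- def return_dask_block_layout(mylist_sorted, dask_client_name_str):
--     tup_len = len(mylist_sorted[2])
--
--     dask_str='data = '
--     for dim in reversed(range(0, tup_len)):
--         dask_str+= '['
--
--     # initialize inputs
--     first_elem = False
--     p0_pub_name = mylist_sorted[0][0]
--     p0_key = mylist_sorted[0][1]
--     p0_tpl = mylist_sorted[0][2]
--     # add first tuple to list
--     p0_full_str = dask_client_name_str + '.datasets[\'' + p0_pub_name + '\'][\'' + p0_key + '\']'
--     dask_str+=str(p0_full_str)
--     t1 = 1
--     while t1 < len(mylist_sorted):
--         p1_pub_name = mylist_sorted[t1][0]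
--         p1_key = mylist_sorted[t1][1]
--         p1_tpl = mylist_sorted[t1][2]
--         # add first tuple to list
--         p1_full_str = dask_client_name_str + '.datasets[\'' + p1_pub_name + '\'][\'' + p1_key + '\']'
--         dim = tup_len-1
--         sepStr , first_elem =  return_separator(p0_tpl, p1_tpl, dim, '',first_elem)
--
--         dask_str += sepStr + str(p1_full_str)
--         t1 = t1 + 1
--         p0_tpl = p1_tpl
--
--     for dim in reversed(range(0, tup_len)):
--         dask_str+= ']'
--
--     return dask_str
-- ===== SOURCE B (Python) =====
-- def return_dask_block_layout(mylist_sorted, dask_client_name_str):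
--     tup_len = len(mylist_sorted[2])  # length of a (name, key, tuple) entry, i.e. 3
--     def ref(entry):
--         return "%s.datasets['%s']['%s']" % (dask_client_name_str, entry[0], entry[1])
--     parts = ['data = ', '[' * tup_len, ref(mylist_sorted[0])]
--     prev = mylist_sorted[0][2]
--     for entry in mylist_sorted[1:]:
--         tpl = entry[2]
--         for d in range(tup_len - 1, -1, -1):
--             if tpl[d] > prev[d]:
--                 count = tup_len - 1 - d
--                 parts.append(']\n' * count + ',' + '[' * count)
--                 break
--         else:
--             # no dimension increases: A emits only the reopening brackets
--             parts.append('[' * (tup_len - 1))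
--         parts.append(ref(entry))
--         prev = tpl
--     parts.append(']' * tup_len)
--     return ''.join(parts)
-- ===== Notes on version B (the rewrite author's own statement) =====
-- stated objective: simpler
-- what changed: Replaces A's recursive return_separator helper and while-loop string accumulation with an inline scan for the first increasing dimension (emitting ']\n'*count + ',' + '['*count, or the no-comma reopen when nothing increases) and a parts list joined once at the end, dropping the output-irrelevant first_elem threading; the join avoids A's repeated string reallocation on +=.
import Mathlib
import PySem

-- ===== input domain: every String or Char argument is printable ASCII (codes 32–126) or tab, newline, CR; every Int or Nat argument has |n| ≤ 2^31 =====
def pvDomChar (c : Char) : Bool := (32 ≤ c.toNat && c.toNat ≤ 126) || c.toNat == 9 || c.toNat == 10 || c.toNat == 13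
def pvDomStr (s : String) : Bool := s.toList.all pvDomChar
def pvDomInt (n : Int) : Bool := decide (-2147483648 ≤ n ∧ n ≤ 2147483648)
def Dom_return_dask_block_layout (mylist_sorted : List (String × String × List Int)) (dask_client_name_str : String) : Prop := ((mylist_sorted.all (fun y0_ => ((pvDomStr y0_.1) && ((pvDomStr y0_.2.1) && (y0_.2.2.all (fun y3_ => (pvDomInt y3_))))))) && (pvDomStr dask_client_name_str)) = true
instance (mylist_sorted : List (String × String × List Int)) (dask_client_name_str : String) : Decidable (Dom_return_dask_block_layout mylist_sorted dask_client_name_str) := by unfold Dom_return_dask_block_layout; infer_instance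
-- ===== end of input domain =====

-- B replaces A's recursive separator helper and while-loop with an inline
-- first-increasing-dimension scan and a joined parts list (objective: simpler).

-- ===== PORT A =====
-- return_separator(p0, p1, dim, instr, first_elem): first component none = IndexError.
-- Python's dim is an int, but every call here has dim ≥ 0 (it starts at tup_len-1 = 2
-- and only recurses when dim > 0), so a Nat dim is an exact transcription.
def pvSepA (p0 p1 : List Int) (dim : Nat) (instr : String) (firstElem : Bool) : Option String × Bool :=
  match PySem.List.pyGet? p1 (dim : Int), PySem.List.pyGet? p0 (dim : Int) with
  | some v1, some v0 =>
    if v1 > v0 then (some (instr ++ ","), false)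
    else
      if dim > 0 then
        match pvSepA p0 p1 (dim - 1) (instr ++ "]\n") false with
        | (some r2, _) => (some ("" ++ r2 ++ "["), true)
        | (none, fe) => (none, fe)
      else (some "", firstElem)
  | _, _ => (none, firstElem)

-- the while-loop over t1 = 1 .. len-1, carrying dask_str, first_elem and p0_tpl
def pvLoopA (c : String) (tupLen : Nat) (p0tpl : List Int)
    (rest : List (String × String × List Int)) (acc : String) (fe : Bool) : Option String :=
  match rest with
  | [] => some acc
  | (n, k, tpl) :: rs =>
    let full := c ++ ".datasets['" ++ n ++ "']['" ++ k ++ "']"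
    match pvSepA p0tpl tpl (tupLen - 1) "" fe with
    | (some sep, fe') => pvLoopA c tupLen tpl rs (acc ++ sep ++ full) fe'
    | (none, _) => none

def return_dask_block_layout (mylist_sorted : List (String × String × List Int)) (dask_client_name_str : String) : String :=
  match PySem.List.pyGet? mylist_sorted (2 : Int) with
  | none => ""  -- IndexError on mylist_sorted[2]; excluded by Pre_
  | some _ =>
    match mylist_sorted with
    | [] => ""  -- unreachable: mylist_sorted[2] succeeded
    | (n0, k0, t0) :: rest =>
      -- len(mylist_sorted[2]) is the length of a (pub_name, key, tuple) 3-tuple, i.e. 3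
      let tupLen : Nat := 3
      let openStr := (List.range tupLen).foldl (fun s _ => s ++ "[") "data = "
      let p0full := dask_client_name_str ++ ".datasets['" ++ n0 ++ "']['" ++ k0 ++ "']"
      match pvLoopA dask_client_name_str tupLen t0 rest (openStr ++ p0full) false with
      | some s => (List.range tupLen).foldl (fun s _ => s ++ "]") s
      | none => ""  -- IndexError inside return_separator; excluded by Pre_

-- ===== PORT B =====
def pvStrMul (s : String) : Nat → String
  | 0 => ""
  | n + 1 => pvStrMul s n ++ s

def pvRefB (c n k : String) : String :=
  c ++ ".datasets['" ++ n ++ "']['" ++ k ++ "']"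

-- the inner for-d/else scan over range(tup_len-1, -1, -1); tpl[d]/prev[d] are in range
-- on every input Pre_ admits, so pyGetD with default 0 is exact there
def pvScanB (prev tpl : List Int) (tupLen : Nat) : List Int → String
  | [] => pvStrMul "[" (tupLen - 1)  -- for-else: no dimension increases
  | d :: ds =>
    if PySem.List.pyGetD tpl d 0 > PySem.List.pyGetD prev d 0 then
      let count := tupLen - 1 - d.toNat
      pvStrMul "]\n" count ++ "," ++ pvStrMul "[" count
    else pvScanB prev tpl tupLen ds

def pvSepB (prev tpl : List Int) (tupLen : Nat) : String :=
  pvScanB prev tpl tupLen (PySem.List.pyRange ((tupLen : Int) - 1) (-1) (-1))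

-- the for-entry loop: each iteration appends the separator and the entry reference
def pvLoopB (c : String) (tupLen : Nat) (prev : List Int)
    (rest : List (String × String × List Int)) : List String :=
  match rest with
  | [] => []
  | (n, k, tpl) :: rs => pvSepB prev tpl tupLen :: pvRefB c n k :: pvLoopB c tupLen tpl rs

def return_dask_block_layout_alt (mylist_sorted : List (String × String × List Int)) (dask_client_name_str : String) : String :=
  match PySem.List.pyGet? mylist_sorted (2 : Int) with
  | none => ""  -- IndexError on mylist_sorted[2]; excluded by Pre_
  | some _ =>
    match mylist_sorted with
    | [] => ""  -- unreachable: mylist_sorted[2] succeeded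
    | (n0, k0, t0) :: rest =>
      let tupLen : Nat := 3  -- len(mylist_sorted[2]): length of a 3-tuple
      PySem.Str.join ""
        (["data = ", pvStrMul "[" tupLen, pvRefB dask_client_name_str n0 k0]
          ++ pvLoopB dask_client_name_str tupLen t0 rest ++ [pvStrMul "]" tupLen])

-- ===== PRECONDITION & SPEC =====
-- Pre_ is exactly where the Python A returns: mylist_sorted[2] needs at least 3 entries,
-- and every entry's tuple is indexed at position tup_len-1 = 2 in some comparison,
-- so each tuple needs length ≥ 3 (shorter ones raise IndexError).
def Pre_return_dask_block_layout (mylist_sorted : List (String × String × List Int)) (dask_client_name_str : String) : Prop :=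
  3 ≤ mylist_sorted.length ∧ ∀ e ∈ mylist_sorted, 3 ≤ e.2.2.length
instance (mylist_sorted : List (String × String × List Int)) (dask_client_name_str : String) : Decidable (Pre_return_dask_block_layout mylist_sorted dask_client_name_str) := by unfold Pre_return_dask_block_layout; infer_instance

def pvWitness_return_dask_block_layout : (List (String × String × List Int)) × String :=
  ([("a", "k", [0, 0, 0]), ("b", "k", [0, 0, 1]), ("c", "k", [0, 1, 0])], "cl")

def Spec_return_dask_block_layout (mylist_sorted : List (String × String × List Int)) (dask_client_name_str : String) (out : String) : Prop := out = return_dask_block_layout_alt mylist_sorted dask_client_name_str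
instance (mylist_sorted : List (String × String × List Int)) (dask_client_name_str : String) (out : String) : Decidable (Spec_return_dask_block_layout mylist_sorted dask_client_name_str out) := by unfold Spec_return_dask_block_layout; infer_instance

-- ===== CLAIM (what is proved, stated in full; the proofs are below) =====
def Claim_equal_return_dask_block_layout : Prop := ∀ (mylist_sorted : List (String × String × List Int)) (dask_client_name_str : String), Dom_return_dask_block_layout mylist_sorted dask_client_name_str → Pre_return_dask_block_layout mylist_sorted dask_client_name_str → Spec_return_dask_block_layout mylist_sorted dask_client_name_str (return_dask_block_layout mylist_sorted dask_client_name_str)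

-- ===== LEMMAS AND PROOFS =====

theorem pvWitness_ok : Dom_return_dask_block_layout pvWitness_return_dask_block_layout.1 pvWitness_return_dask_block_layout.2 ∧ Pre_return_dask_block_layout pvWitness_return_dask_block_layout.1 pvWitness_return_dask_block_layout.2 := by
  decide

theorem joinNil_cons (x : String) (xs : List String) :
    PySem.Str.join "" (x :: xs) = x ++ PySem.Str.join "" xs := by
  cases xs with
  | nil => simp [PySem.Str.join, PySem.Chars.join_singleton, PySem.Chars.join_nil]
  | cons y ys => simp [PySem.Str.join, PySem.Chars.join_cons_cons]

-- A's recursive separator agrees with B's inline scan on tuples of length ≥ 3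
-- (first component; independent of first_elem)
theorem sep_eq (p0 p1 : List Int) (fe : Bool) (h0 : 3 ≤ p0.length) (h1 : 3 ≤ p1.length) :
    (pvSepA p0 p1 2 "" fe).1 = some (pvSepB p0 p1 3) := by
  match p0, p1, h0, h1 with
  | a :: b :: c :: p0t, x :: y :: z :: p1t, _, _ =>
    have hr : PySem.List.pyRange (((3 : Nat) : Int) - 1) (-1) (-1) = [2, 1, 0] := by decide
    rw [pvSepB, hr]
    have g2 : ∀ (u v w : Int) (t : List Int), PySem.List.pyGet? (u::v::w::t) (2:Int) = some w := by
      intro u v w t; simpa using PySem.List.pyGet?_natCast (u::v::w::t) 2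
    have g1 : ∀ (u v w : Int) (t : List Int), PySem.List.pyGet? (u::v::w::t) (1:Int) = some v := by
      intro u v w t; simpa using PySem.List.pyGet?_natCast (u::v::w::t) 1
    have g0 : ∀ (u v w : Int) (t : List Int), PySem.List.pyGet? (u::v::w::t) (0:Int) = some u := by
      intro u v w t; simpa using PySem.List.pyGet?_natCast (u::v::w::t) 0
    by_cases h2 : c < z <;> by_cases hm : b < y <;> by_cases hl : a < x <;>
      simp [pvSepA, pvScanB, PySem.List.pyGetD_ofNat', g2, g1, g0, h2, hm, hl] <;> decide

theorem joinNil_append_singleton (xs : List String) (y : String) :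
    PySem.Str.join "" (xs ++ [y]) = PySem.Str.join "" xs ++ y := by
  induction xs with
  | nil => simp [PySem.Str.join, PySem.Chars.join_nil]
  | cons x xs ih => rw [List.cons_append, joinNil_cons, joinNil_cons, ih, String.append_assoc]

theorem loop_eq (c : String) (rest : List (String × String × List Int)) :
    ∀ (p0 : List Int) (acc : String) (fe : Bool), 3 ≤ p0.length →
    (∀ e ∈ rest, 3 ≤ e.2.2.length) →
    pvLoopA c 3 p0 rest acc fe = some (acc ++ PySem.Str.join "" (pvLoopB c 3 p0 rest)) := by
  induction rest with
  | nil =>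
    intro p0 acc fe _ _
    simp [pvLoopA, pvLoopB, PySem.Str.join, PySem.Chars.join_nil]
  | cons e rs ih =>
    intro p0 acc fe h0 hall
    obtain ⟨n, k, tpl⟩ := e
    have htpl : 3 ≤ tpl.length := hall _ (List.mem_cons_self ..)
    have hsep := sep_eq p0 tpl fe h0 htpl
    simp only [pvLoopA, pvLoopB]
    rcases hA : pvSepA p0 tpl 2 "" fe with ⟨o, fe'⟩
    rw [hA] at hsep
    simp only at hsep
    subst hsep
    dsimp only
    rw [ih tpl _ fe' htpl (fun e he => hall e (List.mem_cons_of_mem _ he))]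
    rw [joinNil_cons, joinNil_cons]
    simp [pvRefB, String.append_assoc]

-- ===== VERDICT (by name: the statement is the Claim_ definition above) =====
theorem return_dask_block_layout_spec : Claim_equal_return_dask_block_layout := by
  intro l c _ hpre
  obtain ⟨hlen, hall⟩ := hpre
  unfold Spec_return_dask_block_layout return_dask_block_layout return_dask_block_layout_alt
  match l, hlen with
  | e0 :: e1 :: e2 :: rs, _ =>
    obtain ⟨n0, k0, t0⟩ := e0
    have hget : PySem.List.pyGet? ((n0, k0, t0) :: e1 :: e2 :: rs) (2 : Int) = some e2 := by
      simpa using PySem.List.pyGet?_natCast ((n0, k0, t0) :: e1 :: e2 :: rs) 2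
    simp only [hget]
    have h0 : 3 ≤ t0.length := hall _ (List.mem_cons_self ..)
    rw [loop_eq c (e1 :: e2 :: rs) t0 _ false h0
      (fun e he => hall e (List.mem_cons_of_mem _ he))]
    dsimp only
    simp only [List.cons_append, List.nil_append]
    rw [joinNil_cons, joinNil_cons, joinNil_cons, joinNil_append_singleton]
    have hopen : List.foldl (fun s _ => s ++ "[") "data = " (List.range 3)
        = "data = " ++ pvStrMul "[" 3 := by decide
    have hclose : ∀ s : String, List.foldl (fun s _ => s ++ "]") s (List.range 3)
        = s ++ pvStrMul "]" 3 := by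
      intro s
      rw [show List.range 3 = [0, 1, 2] from rfl]
      simp only [List.foldl]
      rw [String.append_assoc, String.append_assoc]
      congr 1
    rw [hclose, hopen]
    simp [pvRefB, String.append_assoc]
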